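-- pv_equiv track=rewrite | github.com/jsethuram/python | word_mixer.py | word_mixer
-- ===== SOURCE A (Python) =====
-- def word_mixer(words_list):
--     sorted_list = sorted(words_list)
--     sorted_list_len = len(sorted_list)
--     new_words = []
--     while sorted_list_len > 5:
--         new_words.append(sorted_list.pop(-5))
--         sorted_list_len = sorted_list_len - 1
--         new_words.append(sorted_list.pop(0))
--         sorted_list_len = sorted_list_len - 1
--         new_words.append(sorted_list.pop(-1))
--         sorted_list_len = sorted_list_len - 1
--     return new_words
-- ===== SOURCE B (Python) =====
-- def word_mixer(words_list):
--     s = sorted(words_list)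
--     n = len(s)
--     if n <= 5:
--         return []
--     new_words = []
--     i, j = 0, n - 3
--     t0, t1, t2 = s[n - 3], s[n - 2], s[n - 1]
--     while j - i > 2:
--         new_words.append(s[j - 2])
--         new_words.append(s[i])
--         new_words.append(t2)
--         t0, t1, t2 = s[j - 1], t0, t1
--         i += 1
--         j -= 2
--     return new_words
-- ===== Notes on version B (the rewrite author's own statement) =====
-- stated objective: faster
-- what changed: A repeatedly mutates the sorted list with pop(-5)/pop(0)/pop(-1) (each pop shifting elements, O(n) per iteration); B sorts once and then does a single O(1)-per-iteration index walk over the sorted array with a 3-element sliding tail window, never mutating the list.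
import Mathlib
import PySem

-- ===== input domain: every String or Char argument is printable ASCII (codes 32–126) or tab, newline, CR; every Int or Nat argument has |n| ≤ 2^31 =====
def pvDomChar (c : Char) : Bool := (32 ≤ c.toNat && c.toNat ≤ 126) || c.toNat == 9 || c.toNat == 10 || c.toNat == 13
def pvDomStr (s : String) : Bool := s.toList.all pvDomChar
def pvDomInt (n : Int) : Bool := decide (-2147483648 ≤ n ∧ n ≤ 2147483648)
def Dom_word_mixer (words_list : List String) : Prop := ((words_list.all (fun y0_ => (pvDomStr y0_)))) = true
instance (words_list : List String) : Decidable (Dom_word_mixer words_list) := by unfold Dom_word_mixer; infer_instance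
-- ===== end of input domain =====

-- B replaces A's quadratic pop-simulation on a mutating list by a single pass of
-- index arithmetic over the sorted array (objective: faster, asymptotic).

-- ===== PORT A =====
-- while len > 5: pop(-5), pop(0), pop(-1), each appended to new_words
def wmLoopA (sorted_list : List String) (sorted_list_len : Int) (new_words : List String) : List String :=
  if 5 < sorted_list_len then
    match h1 : PySem.List.pop? sorted_list (-5) with
    | none => new_words
    | some (v1, l1) =>
      match h2 : PySem.List.pop? l1 0 with
      | none => new_words ++ [v1]
      | some (v2, l2) =>
        match h3 : PySem.List.pop? l2 (-1) with
        | none => new_words ++ [v1, v2]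
        | some (v3, l3) =>
          wmLoopA l3 (sorted_list_len - 1 - 1 - 1) (new_words ++ [v1] ++ [v2] ++ [v3])
  else new_words
termination_by sorted_list.length
decreasing_by
  have e1 := PySem.List.length_of_pop?_eq_some sorted_list h1
  have e2 := PySem.List.length_of_pop?_eq_some l1 h2
  have e3 := PySem.List.length_of_pop?_eq_some l2 h3
  simp at e1 e2 e3; omega

def word_mixer (words_list : List String) : List String :=
  let sorted_list := PySem.List.sorted words_list (fun x => x) false
  let sorted_list_len : Int := sorted_list.length
  wmLoopA sorted_list sorted_list_len []

-- ===== PORT B =====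
-- one pass over the sorted array: emit s[j-2], s[i], t2; shift the 3-element tail window
def wmLoopB (s : List String) (i j : Int) (t0 t1 t2 : String) (new_words : List String) : List String :=
  if 2 < j - i then
    wmLoopB s (i + 1) (j - 2) (PySem.List.pyGetD s (j - 1) "") t0 t1
      (new_words ++ [PySem.List.pyGetD s (j - 2) "", PySem.List.pyGetD s i "", t2])
  else new_words
termination_by (j - i).toNat
decreasing_by omega

def word_mixer_alt (words_list : List String) : List String :=
  let s := PySem.List.sorted words_list (fun x => x) false
  let n : Int := s.length
  if n ≤ 5 then []
  else
    wmLoopB s 0 (n - 3) (PySem.List.pyGetD s (n - 3) "") (PySem.List.pyGetD s (n - 2) "")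
      (PySem.List.pyGetD s (n - 1) "") []

-- ===== PRECONDITION & SPEC =====
def Spec_word_mixer (words_list : List String) (out : List String) : Prop := out = word_mixer_alt words_list
instance (words_list : List String) (out : List String) : Decidable (Spec_word_mixer words_list out) := by unfold Spec_word_mixer; infer_instance

-- ===== CLAIM (what is proved, stated in full; the proofs are below) =====
def Claim_equal_word_mixer : Prop := ∀ (words_list : List String), Dom_word_mixer words_list → Spec_word_mixer words_list (word_mixer words_list)


-- ===== LEMMAS AND PROOFS =====

-- pop at a negative index -k on a list of length >= k
lemma pop_neg (xs : List String) (k : Nat) (h0 : 0 < k) (h : k ≤ xs.length) :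
    PySem.List.pop? xs (-(k : Int)) =
      some (xs.getD (xs.length - k) "", xs.eraseIdx (xs.length - k)) := by
  have hlt : xs.length - k < xs.length := by omega
  simp [PySem.List.pop?, PySem.List.pyIdx?]
  rw [if_neg (by omega), if_pos (by omega)]
  simp [List.getElem?_eq_getElem hlt]

-- one iteration of A's while-loop, when all three pops succeed
lemma wmLoopA_step (L : List String) (n : Int) (acc : List String)
    (v1 v2 v3 : String) (l1 l2 l3 : List String) (h5 : 5 < n)
    (hp1 : PySem.List.pop? L (-5) = some (v1, l1))
    (hp2 : PySem.List.pop? l1 0 = some (v2, l2))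
    (hp3 : PySem.List.pop? l2 (-1) = some (v3, l3)) :
    wmLoopA L n acc = wmLoopA l3 (n - 1 - 1 - 1) (acc ++ [v1] ++ [v2] ++ [v3]) := by
  rw [wmLoopA, if_pos h5]
  split
  · next heq => rw [hp1] at heq; exact absurd heq (by simp)
  · next w1 m1 heq =>
    rw [hp1] at heq
    simp only [Option.some.injEq, Prod.mk.injEq] at heq
    obtain ⟨h1, h2⟩ := heq
    subst h1; subst h2
    split
    · next heq2 => rw [hp2] at heq2; exact absurd heq2 (by simp)
    · next w2 m2 heq2 =>
      rw [hp2] at heq2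
      simp only [Option.some.injEq, Prod.mk.injEq] at heq2
      obtain ⟨h1, h2⟩ := heq2
      subst h1; subst h2
      split
      · next heq3 => rw [hp3] at heq3; exact absurd heq3 (by simp)
      · next w3 m3 heq3 =>
        rw [hp3] at heq3
        simp only [Option.some.injEq, Prod.mk.injEq] at heq3
        obtain ⟨h1, h2⟩ := heq3
        subst h1; subst h2
        rfl

-- peel the head s[i] and the last two elements s[j-2], s[j-1] off the run s[i:j]
lemma front_split (s : List String) (i j : Nat) (h1 : i + 3 ≤ j) (h2 : j ≤ s.length) :
    (s.take j).drop i =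
      s.getD i "" :: ((s.take (j-2)).drop (i+1) ++ [s.getD (j-2) "", s.getD (j-1) ""]) := by
  have hj1 : j - 1 < s.length := by omega
  have hj2 : j - 2 < s.length := by omega
  have e1 : s.take j = s.take (j-1) ++ [s[j-1]] := by
    have := @List.take_add_one _ s (j-1)
    rw [show j - 1 + 1 = j from by omega] at this
    simp [this, List.getElem?_eq_getElem hj1]
  have e2 : s.take (j-1) = s.take (j-2) ++ [s[j-2]] := by
    have := @List.take_add_one _ s (j-2)
    rw [show j - 2 + 1 = j - 1 from by omega] at this
    simp [this, List.getElem?_eq_getElem hj2]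
  have hi : i < (s.take (j-2)).length := by simp; omega
  rw [e1, e2, List.drop_append_of_le_length (by simp; omega),
      List.drop_append_of_le_length (by simp; omega),
      List.drop_eq_getElem_cons hi, List.getElem_take,
      List.getD_eq_getElem s _ (by omega : i < s.length),
      List.getD_eq_getElem s _ hj2, List.getD_eq_getElem s _ hj1]
  simp

-- A's mutating loop on the state  s[i:j] ++ [t0,t1,t2]  is B's index loop
lemma loop_eq (s : List String) :
    ∀ (N i j : Nat), j - i ≤ N → i ≤ j → j ≤ s.length →
      ∀ (t0 t1 t2 : String) (acc : List String),
      wmLoopA ((s.take j).drop i ++ [t0, t1, t2]) (((j - i : Nat) : Int) + 3) acc =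
        wmLoopB s (i : Int) (j : Int) t0 t1 t2 acc := by
  intro N
  induction N with
  | zero =>
    intro i j hN hij hj t0 t1 t2 acc
    rw [wmLoopA, wmLoopB, if_neg (by omega), if_neg (by omega)]
  | succ N ih =>
    intro i j hN hij hj t0 t1 t2 acc
    by_cases hsmall : j - i ≤ 2
    · rw [wmLoopA, wmLoopB, if_neg (by omega), if_neg (by omega)]
    · have h3 : i + 3 ≤ j := by omega
      set gi := s.getD i "" with hgi
      set a := s.getD (j-2) "" with ha
      set b := s.getD (j-1) "" with hb
      set F' := (s.take (j-2)).drop (i+1) with hF'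
      have hF'len : F'.length = j - 2 - (i+1) := by simp [hF']; omega
      have hL : (s.take j).drop i ++ [t0, t1, t2]
          = (gi :: F') ++ (a :: [b, t0, t1, t2]) := by
        rw [front_split s i j h3 hj]
        simp only [List.append_assoc, List.cons_append, List.nil_append]
        rfl
      have hXlen : (gi :: F').length = j - i - 2 := by simp [hF'len]; omega
      have hpop1 : PySem.List.pop? ((s.take j).drop i ++ [t0, t1, t2]) (-5)
          = some (a, (gi :: F') ++ [b, t0, t1, t2]) := by
        rw [hL, show (-5 : Int) = -((5 : Nat) : Int) from by norm_num,
            pop_neg _ 5 (by omega)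
              (by simp only [List.length_append, List.length_cons, hF'len]; omega)]
        have hidx : ((gi :: F') ++ (a :: [b, t0, t1, t2])).length - 5 = (gi :: F').length := by
          simp [hXlen]; omega
        rw [hidx]
        have hval : ((gi :: F') ++ a :: [b, t0, t1, t2]).getD (gi :: F').length "" = a := by
          rw [List.getD_eq_getElem _ _ (by simp), List.getElem_append_right (le_refl _)]
          simp
        have hers : ((gi :: F') ++ a :: [b, t0, t1, t2]).eraseIdx (gi :: F').length
            = (gi :: F') ++ [b, t0, t1, t2] := by
          rw [List.eraseIdx_append_of_length_le (le_refl _)]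
          simp
        rw [hval, hers]
      have hpop2 : PySem.List.pop? ((gi :: F') ++ [b, t0, t1, t2]) 0
          = some (gi, F' ++ [b, t0, t1, t2]) := by
        rw [List.cons_append, PySem.List.pop?_zero_cons]
      have hpop3 : PySem.List.pop? (F' ++ [b, t0, t1, t2]) (-1)
          = some (t2, F' ++ [b, t0, t1]) := by
        rw [show F' ++ [b, t0, t1, t2] = (F' ++ [b, t0, t1]) ++ [t2] from by simp,
            PySem.List.pop?_last]
      rw [wmLoopA_step _ _ _ _ _ _ _ _ _ (by omega) hpop1 hpop2 hpop3,
          wmLoopB, if_pos (by omega)]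
      have c1 : (j : Int) - 1 = ((j - 1 : Nat) : Int) := by omega
      have c2 : (j : Int) - 2 = ((j - 2 : Nat) : Int) := by omega
      have c3 : (i : Int) + 1 = ((i + 1 : Nat) : Int) := by omega
      have c4 : (i : Int) = ((i : Nat) : Int) := rfl
      rw [c1, c2, c3, PySem.List.pyGetD_natCast, PySem.List.pyGetD_natCast,
          PySem.List.pyGetD_natCast]
      have := ih (i+1) (j-2) (by omega) (by omega) (by omega) b t0 t1
        (acc ++ [a, gi, t2])
      rw [show (((j - i : Nat) : Int) + 3 - 1 - 1 - 1)
            = (((j - 2 - (i + 1) : Nat) : Int) + 3) from by omega,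
          show acc ++ [a] ++ [gi] ++ [t2] = acc ++ [a, gi, t2] from by simp]
      rw [hgi, ha, hb] at this ⊢
      exact this

-- the whole sorted list is the run s[0:n-3] plus its last three elements
lemma initial_split (s : List String) (h : 5 < s.length) :
    s = (s.take (s.length - 3)).drop 0 ++
      [s.getD (s.length - 3) "", s.getD (s.length - 2) "", s.getD (s.length - 1) ""] := by
  have h1 : s.length - 3 < s.length := by omega
  have h2 : s.length - 2 < s.length := by omega
  have h3 : s.length - 1 < s.length := by omega
  rw [List.drop_zero, List.getD_eq_getElem s _ h1, List.getD_eq_getElem s _ h2,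
      List.getD_eq_getElem s _ h3]
  have hd : s.drop (s.length - 3) = [s[s.length - 3], s[s.length - 2], s[s.length - 1]] := by
    rw [List.drop_eq_getElem_cons h1, show s.length - 3 + 1 = s.length - 2 from by omega,
        List.drop_eq_getElem_cons h2, show s.length - 2 + 1 = s.length - 1 from by omega,
        List.drop_eq_getElem_cons h3, List.drop_eq_nil_of_le (by omega)]
  conv_lhs => rw [← List.take_append_drop (s.length - 3) s]
  rw [hd]

-- ===== VERDICT (by name: the statement is the Claim_ definition above) =====
theorem word_mixer_spec : Claim_equal_word_mixer := by
  unfold Claim_equal_word_mixer Spec_word_mixer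
  intro words_list _
  set s := PySem.List.sorted words_list (fun x => x) false with hs
  have hA : word_mixer words_list = wmLoopA s (s.length : Int) [] := rfl
  have hB : word_mixer_alt words_list =
      if (s.length : Int) ≤ 5 then []
      else wmLoopB s 0 ((s.length : Int) - 3)
        (PySem.List.pyGetD s ((s.length : Int) - 3) "")
        (PySem.List.pyGetD s ((s.length : Int) - 2) "")
        (PySem.List.pyGetD s ((s.length : Int) - 1) "") [] := rfl
  rw [hA, hB]
  by_cases h5 : (s.length : Int) ≤ 5
  · rw [if_pos h5, wmLoopA, if_neg (by omega)]
  · rw [if_neg h5]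
    have hlen : 5 < s.length := by omega
    have c1 : (s.length : Int) - 3 = ((s.length - 3 : Nat) : Int) := by omega
    have c2 : (s.length : Int) - 2 = ((s.length - 2 : Nat) : Int) := by omega
    have c3 : (s.length : Int) - 1 = ((s.length - 1 : Nat) : Int) := by omega
    rw [c1, c2, c3, PySem.List.pyGetD_natCast, PySem.List.pyGetD_natCast,
        PySem.List.pyGetD_natCast]
    have key := loop_eq s (s.length - 3) 0 (s.length - 3) (by omega) (by omega) (by omega)
      (s.getD (s.length - 3) "") (s.getD (s.length - 2) "") (s.getD (s.length - 1) "") []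
    rw [← initial_split s hlen] at key
    rw [show ((s.length : Nat) : Int) = (((s.length - 3 - 0 : Nat) : Int) + 3) from by omega]
    rw [key]
    norm_num
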